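-- pv_equiv track=rewrite | github.com/tomtim1991/Simple-Rainfall-Runoff-Model-App | hydrograph.py | alternate_blocks
-- ===== SOURCE A (Python) =====
-- def alternate_blocks(lst):
--     sorted_lst = sorted(lst, reverse=True)
--     result = [sorted_lst.pop(0)]
--     while sorted_lst:
--         result.append(sorted_lst.pop(0))
--         if sorted_lst:
--             result.insert(0, sorted_lst.pop(0))
--     return result
-- ===== SOURCE B (Python) =====
-- def alternate_blocks(lst):
--     s = sorted(lst, reverse=True)
--     front = []
--     back = [s[0]]
--     odd = True
--     for v in s[1:]:
--         if odd:
--             back.append(v)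
--         else:
--             front.append(v)
--         odd = not odd
--     front.reverse()
--     return front + back
-- ===== Notes on version B (the rewrite author's own statement) =====
-- stated objective: faster
-- what changed: Replaces the O(n) pop(0)/insert(0) deque-emulation loop by one linear pass over the sorted list that appends alternately to a 'back' and a 'front' list and reverses 'front' once at the end.
import Mathlib
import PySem

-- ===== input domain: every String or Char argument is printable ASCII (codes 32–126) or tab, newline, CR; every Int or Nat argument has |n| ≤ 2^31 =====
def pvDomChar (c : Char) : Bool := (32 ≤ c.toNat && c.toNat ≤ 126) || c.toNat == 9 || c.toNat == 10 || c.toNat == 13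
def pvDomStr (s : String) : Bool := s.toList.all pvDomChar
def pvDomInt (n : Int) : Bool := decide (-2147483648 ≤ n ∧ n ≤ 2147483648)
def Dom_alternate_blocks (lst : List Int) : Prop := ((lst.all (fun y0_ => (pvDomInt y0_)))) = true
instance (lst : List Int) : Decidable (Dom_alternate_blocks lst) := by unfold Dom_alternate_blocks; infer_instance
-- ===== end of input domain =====

-- B replaces A's quadratic pop(0)/insert(0) loop by a single linear pass over the
-- sorted list (alternating front/back appends, one final reverse): faster asymptotically.


-- ===== PORT A =====
-- while sorted_lst: result.append(pop(0)); if sorted_lst: result.insert(0, pop(0))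
def pvLoopA (res : List Int) (s : List Int) : List Int :=
  match s with
  | [] => res
  | a :: rest =>
    match rest with
    | [] => res ++ [a]
    | b :: rest' => pvLoopA (b :: (res ++ [a])) rest'

def alternate_blocks (lst : List Int) : List Int :=
  match PySem.List.sorted lst (fun x => x) true with
  | [] => []            -- Python: sorted_lst.pop(0) raises IndexError here (excluded by Pre_)
  | x :: rest => pvLoopA [x] rest

-- ===== PORT B =====
-- loop body: if odd: back.append(v) else: front.append(v); odd = not odd
def pvStepB (st : List Int × List Int × Bool) (v : Int) : List Int × List Int × Bool :=
  if st.2.2 then (st.1, st.2.1 ++ [v], !st.2.2) else (st.1 ++ [v], st.2.1, !st.2.2)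

def alternate_blocks_alt (lst : List Int) : List Int :=
  match PySem.List.sorted lst (fun x => x) true with
  | [] => []            -- Python: s[0] raises IndexError here (excluded by Pre_)
  | s0 :: t =>          -- s[1:] of s = s0 :: t is t
    let st := t.foldl pvStepB ([], [s0], true)
    st.1.reverse ++ st.2.1

-- ===== PRECONDITION & SPEC =====
-- Both Pythons raise IndexError on the empty list; nothing else is excluded.
def Pre_alternate_blocks (lst : List Int) : Prop := lst ≠ []
instance (lst : List Int) : Decidable (Pre_alternate_blocks lst) := by unfold Pre_alternate_blocks; infer_instance
def pvWitness_alternate_blocks : List Int := [3, 1, 4, 1, 5]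

def Spec_alternate_blocks (lst : List Int) (out : List Int) : Prop := out = alternate_blocks_alt lst
instance (lst : List Int) (out : List Int) : Decidable (Spec_alternate_blocks lst out) := by unfold Spec_alternate_blocks; infer_instance

-- ===== CLAIM (what is proved, stated in full; the proofs are below) =====
def Claim_equal_alternate_blocks : Prop := ∀ (lst : List Int), Dom_alternate_blocks lst → Pre_alternate_blocks lst → Spec_alternate_blocks lst (alternate_blocks lst)

-- ===== LEMMAS AND PROOFS =====

-- (even-index elements, odd-index elements) of a list
def pvParts' : List Int → List Int × List Int
  | [] => ([], [])
  | a :: r => (a :: (pvParts' r).2, (pvParts' r).1)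

theorem pvLoopA_eq (res t : List Int) :
    pvLoopA res t = (pvParts' t).2.reverse ++ res ++ (pvParts' t).1 := by
  induction res, t using pvLoopA.induct with
  | case1 res => simp [pvLoopA, pvParts']
  | case2 res a => simp [pvLoopA, pvParts']
  | case3 res a b rest' ih => simp [pvLoopA, pvParts', ih]

theorem pvFoldB_eq (t : List Int) : ∀ f b : List Int,
    ((t.foldl pvStepB (f, b, true)).1 = f ++ (pvParts' t).2 ∧
     (t.foldl pvStepB (f, b, true)).2.1 = b ++ (pvParts' t).1) ∧
    ((t.foldl pvStepB (f, b, false)).1 = f ++ (pvParts' t).1 ∧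
     (t.foldl pvStepB (f, b, false)).2.1 = b ++ (pvParts' t).2) := by
  induction t with
  | nil => intro f b; simp [pvParts']
  | cons a r ih =>
    intro f b
    simp only [List.foldl_cons, pvStepB, pvParts']
    constructor
    · simpa using (ih f (b ++ [a])).2
    · simpa using (ih (f ++ [a]) b).1

-- ===== VERDICT (by name: the statement is the Claim_ definition above) =====
theorem alternate_blocks_spec : Claim_equal_alternate_blocks := by
  intro lst _ _
  unfold Spec_alternate_blocks alternate_blocks alternate_blocks_alt
  cases h : PySem.List.sorted lst (fun x => x) true with
  | nil => rfl
  | cons s0 t =>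
    have hA := pvLoopA_eq [s0] t
    have hB := (pvFoldB_eq t [] [s0]).1
    simp [hA, hB.1, hB.2]
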